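-- pv_equiv track=rewrite | github.com/boss9293-ops/Marketflow-v1.1 | marketflow/backend/services/fact_engine.py | extract_sector_flow
-- ===== SOURCE A (Python) =====
-- from typing import Any
--
-- def _article_text(article: dict[str, Any]) -> str:
--     title = str(article.get("title") or "").strip()
--     snippet = str(article.get("snippet") or article.get("summary") or "").strip()
--     return f"{title} {snippet}".lower()
--
-- def _contains_any(text: str, keywords: list[str]) -> bool:
--     return any(keyword in text for keyword in keywords)
--
-- def extract_sector_flow(articles: list[dict[str, Any]]) -> list[str]:
--     sector_map = {
--         "energy": 0,
--         "tech": 0,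
--         "financial": 0,
--     }
--
--     for article in articles:
--         text = _article_text(article)
--
--         if _contains_any(text, ["oil", "crude", "energy", "brent", "wti", "xom", "cvx"]):
--             sector_map["energy"] += 1
--         if _contains_any(text, ["tech", "ai", "semiconductor", "chip", "software", "nvidia", "apple", "microsoft"]):
--             sector_map["tech"] += 1
--         if _contains_any(text, ["bank", "banks", "financial", "credit", "lender", "jpmorgan", "goldman"]):
--             sector_map["financial"] += 1
--
--     result: list[str] = []
--     if sector_map["energy"] > 0:
--         result.append("에너지 관련 이슈 증가")
--     if sector_map["tech"] > 0:
--         result.append("기술주 관련 이슈 증가")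
--     if sector_map["financial"] > 0:
--         result.append("금융주 관련 이슈 증가")
--
--     if not result:
--         result.append("섹터 전반 혼조 흐름")
--
--     return result[:3]
-- ===== SOURCE B (Python) =====
-- from typing import Any
--
-- def _article_text(article: dict[str, Any]) -> str:
--     title = str(article.get("title") or "").strip()
--     snippet = str(article.get("snippet") or article.get("summary") or "").strip()
--     return f"{title} {snippet}".lower()
--
-- _SECTOR_TABLE = [
--     ("에너지 관련 이슈 증가", ["oil", "crude", "energy", "brent", "wti", "xom", "cvx"]),
--     ("기술주 관련 이슈 증가", ["tech", "ai", "semiconductor", "chip", "software", "nvidia", "apple", "microsoft"]),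
--     ("금융주 관련 이슈 증가", ["bank", "banks", "financial", "credit", "lender", "jpmorgan", "goldman"]),
-- ]
--
-- def extract_sector_flow(articles: list[dict[str, Any]]) -> list[str]:
--     flags = [label for label, kws in _SECTOR_TABLE
--              if any(kw in _article_text(a) for a in articles for kw in kws)]
--     if not flags:
--         flags = ["섹터 전반 혼조 흐름"]
--     return flags[:3]
-- ===== Notes on version B (the rewrite author's own statement) =====
-- stated objective: simpler
-- what changed: Replaces the per-article counting loop over a mutable sector dict with a static (label, keywords) table and one short-circuiting boolean presence pass per sector, building the output directly by a table comprehension.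
import Mathlib
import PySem

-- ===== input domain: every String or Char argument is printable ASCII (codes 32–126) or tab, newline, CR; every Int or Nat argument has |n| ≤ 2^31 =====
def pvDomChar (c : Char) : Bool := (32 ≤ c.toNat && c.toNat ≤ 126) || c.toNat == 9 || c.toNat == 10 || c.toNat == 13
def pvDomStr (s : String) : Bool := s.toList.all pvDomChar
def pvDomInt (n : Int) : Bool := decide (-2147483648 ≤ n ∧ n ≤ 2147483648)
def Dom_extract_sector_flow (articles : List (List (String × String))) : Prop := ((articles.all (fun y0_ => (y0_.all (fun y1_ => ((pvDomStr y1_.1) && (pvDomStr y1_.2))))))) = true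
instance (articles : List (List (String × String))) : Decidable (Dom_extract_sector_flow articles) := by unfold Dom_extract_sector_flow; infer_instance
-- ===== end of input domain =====

-- B replaces A's per-article counting loop over a mutable sector dict by a static (label, keywords)
-- table and one short-circuiting per-sector presence pass (objective: simpler).

-- ===== PORT A =====
-- shared helper _article_text (dict[str,Any] → association-list; 'x or ""' on strings is x itself for
-- title, and the snippet/summary fallback fires exactly when the looked-up string is empty — exact)
def articleText (article : List (String × String)) : List Char :=
  let d : PySem.Dict String String := PySem.Dict.mk article
  let title := PySem.Chars.strip (d.getD "title" "").toList
  let sn0 := (d.getD "snippet" "").toList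
  let snippet := PySem.Chars.strip (if sn0.isEmpty then (d.getD "summary" "").toList else sn0)
  PySem.Chars.lower (title ++ [' '] ++ snippet)

-- helper _contains_any
def containsAny (text : List Char) (keywords : List (List Char)) : Bool :=
  keywords.any (fun kw => PySem.Chars.isIn kw text)

def energyKws : List (List Char) :=
  ["oil".toList, "crude".toList, "energy".toList, "brent".toList, "wti".toList, "xom".toList, "cvx".toList]
def techKws : List (List Char) :=
  ["tech".toList, "ai".toList, "semiconductor".toList, "chip".toList, "software".toList, "nvidia".toList, "apple".toList, "microsoft".toList]
def finKws : List (List Char) :=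
  ["bank".toList, "banks".toList, "financial".toList, "credit".toList, "lender".toList, "jpmorgan".toList, "goldman".toList]

-- sector_map, a dict with the three fixed keys "energy"/"tech"/"financial", is ported as an Int triple
-- (energy, tech, financial) in that order — exact, the keys never change
-- one iteration of A's article loop over the counter triple
def stepSector (m : Int × Int × Int) (article : List (String × String)) : Int × Int × Int :=
  let text := articleText article
  let m := if containsAny text energyKws then (m.1 + 1, m.2.1, m.2.2) else m
  let m := if containsAny text techKws then (m.1, m.2.1 + 1, m.2.2) else m
  let m := if containsAny text finKws then (m.1, m.2.1, m.2.2 + 1) else m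
  m

def extract_sector_flow (articles : List (List (String × String))) : List String :=
  let m : Int × Int × Int := articles.foldl stepSector (0, 0, 0)
  let result : List String := []
  let result := if m.1 > 0 then result ++ ["에너지 관련 이슈 증가"] else result
  let result := if m.2.1 > 0 then result ++ ["기술주 관련 이슈 증가"] else result
  let result := if m.2.2 > 0 then result ++ ["금융주 관련 이슈 증가"] else result
  let result := if result.isEmpty then result ++ ["섹터 전반 혼조 흐름"] else result
  PySem.List.slice result none (some 3)

-- ===== PORT B =====
def sectorTable : List (String × List (List Char)) :=
  [("에너지 관련 이슈 증가", energyKws),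
   ("기술주 관련 이슈 증가", techKws),
   ("금융주 관련 이슈 증가", finKws)]

def extract_sector_flow_alt (articles : List (List (String × String))) : List String :=
  let flags := sectorTable.filterMap (fun lk =>
    if articles.any (fun a => lk.2.any (fun kw => PySem.Chars.isIn kw (articleText a)))
    then some lk.1 else none)
  let flags := if flags.isEmpty then ["섹터 전반 혼조 흐름"] else flags
  PySem.List.slice flags none (some 3)

-- ===== PRECONDITION & SPEC =====
def Spec_extract_sector_flow (articles : List (List (String × String))) (out : List String) : Prop := out = extract_sector_flow_alt articles
instance (articles : List (List (String × String))) (out : List String) : Decidable (Spec_extract_sector_flow articles out) := by unfold Spec_extract_sector_flow; infer_instance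

-- ===== CLAIM (what is proved, stated in full; the proofs are below) =====
def Claim_equal_extract_sector_flow : Prop := ∀ (articles : List (List (String × String))), Dom_extract_sector_flow articles → Spec_extract_sector_flow articles (extract_sector_flow articles)

-- ===== LEMMAS AND PROOFS =====

-- A's fold of the counter triple equals initial value plus the three countP's
theorem loop_counts (articles : List (List (String × String))) (s : Int × Int × Int) :
    articles.foldl stepSector s
    = (s.1 + (articles.countP (fun a => containsAny (articleText a) energyKws) : Int),
       s.2.1 + (articles.countP (fun a => containsAny (articleText a) techKws) : Int),
       s.2.2 + (articles.countP (fun a => containsAny (articleText a) finKws) : Int)) := by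
  induction articles generalizing s with
  | nil => simp
  | cons a rest ih =>
      simp only [List.foldl_cons, List.countP_cons, ih, stepSector]
      split_ifs <;> simp_all <;> omega

theorem pos_countP_iff_any {α : Type} (p : α → Bool) (l : List α) :
    ((0 : Int) + (l.countP p : Int) > 0) ↔ l.any p = true := by
  simp [List.countP_pos_iff, List.any_eq_true]

-- ===== VERDICT (by name: the statement is the Claim_ definition above) =====
theorem extract_sector_flow_spec : Claim_equal_extract_sector_flow := by
  intro articles _
  show extract_sector_flow articles = extract_sector_flow_alt articles
  unfold extract_sector_flow extract_sector_flow_alt sectorTable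
  rw [loop_counts]
  simp only [pos_countP_iff_any, List.filterMap_cons, List.filterMap_nil, containsAny]
  by_cases b1 : articles.any (fun a => energyKws.any (fun kw => PySem.Chars.isIn kw (articleText a))) = true <;>
  by_cases b2 : articles.any (fun a => techKws.any (fun kw => PySem.Chars.isIn kw (articleText a))) = true <;>
  by_cases b3 : articles.any (fun a => finKws.any (fun kw => PySem.Chars.isIn kw (articleText a))) = true <;>
    simp [b1, b2, b3, PySem.List.slice_to]
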